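-- pv_equiv track=rewrite | github.com/laurambarreto/Processamento_Linguagem_Natural_1 | Grid_Search.py | contagem_por_polaridade
-- ===== SOURCE A (Python) =====
-- from collections import Counter
--
-- def contagem_por_polaridade (sentimentos, linha):
--     positividade = 0
--     negatividade = 0
--     neutralidade = 0
--     palavras_negativas = Counter()
--     palavras_positivas = Counter()
--     palavras_neutras = Counter()
--     for word in linha.split ():
--         word = word.lower()
--         if word in sentimentos:
--             POL = sentimentos[word][1]
--             if POL == "-1":
--                 negatividade += 1
--                 palavras_negativas[word] += 1
--             elif POL == "0":
--                 neutralidade += 1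
--                 palavras_neutras[word] += 1
--             else:
--                 positividade += 1
--                 palavras_positivas[word] += 1
--
--     return negatividade,neutralidade, positividade, palavras_negativas, palavras_positivas, palavras_neutras
-- ===== SOURCE B (Python) =====
-- from collections import Counter
--
-- def contagem_por_polaridade(sentimentos, linha):
--     matched = [(w, sentimentos[w][1])
--                for w in (word.lower() for word in linha.split())
--                if w in sentimentos]
--     negatividade = sum(1 for w, p in matched if p == "-1")
--     neutralidade = sum(1 for w, p in matched if p == "0")
--     positividade = sum(1 for w, p in matched if p not in ("-1", "0"))
--     palavras_negativas = Counter(w for w, p in matched if p == "-1")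
--     palavras_neutras = Counter(w for w, p in matched if p == "0")
--     palavras_positivas = Counter(w for w, p in matched if p not in ("-1", "0"))
--     return negatividade, neutralidade, positividade, palavras_negativas, palavras_positivas, palavras_neutras
-- ===== Notes on version B (the rewrite author's own statement) =====
-- stated objective: alternative
-- what changed: Replaces A's single fold that threads six accumulators through one loop with a two-phase decomposition: first materialize the matched (word, polarity) list, then derive each total and each Counter by its own independent filtering pass.
import Mathlib
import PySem

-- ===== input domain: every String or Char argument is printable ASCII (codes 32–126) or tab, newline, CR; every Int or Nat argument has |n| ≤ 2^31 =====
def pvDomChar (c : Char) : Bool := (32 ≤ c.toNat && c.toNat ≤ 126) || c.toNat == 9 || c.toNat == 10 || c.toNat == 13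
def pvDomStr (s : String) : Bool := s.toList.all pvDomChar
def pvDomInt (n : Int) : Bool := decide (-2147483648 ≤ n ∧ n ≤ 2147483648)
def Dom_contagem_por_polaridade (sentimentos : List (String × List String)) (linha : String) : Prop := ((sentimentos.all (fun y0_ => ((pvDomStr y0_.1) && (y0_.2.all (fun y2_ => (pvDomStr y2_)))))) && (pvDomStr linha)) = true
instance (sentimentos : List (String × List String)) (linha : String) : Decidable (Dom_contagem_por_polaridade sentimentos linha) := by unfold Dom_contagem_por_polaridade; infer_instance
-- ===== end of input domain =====

-- B re-implements the count by first materializing the matched (word, polarity) list and then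
-- deriving each total and Counter with its own independent pass; same results, different decomposition.

-- ===== PORT A =====
-- loop state: (positividade, negatividade, neutralidade, palavras_negativas, palavras_positivas, palavras_neutras)
def pvAState := Int × Int × Int × PySem.Dict String Int × PySem.Dict String Int × PySem.Dict String Int

def pvAStep (sentimentos : List (String × List String)) (st : pvAState) (word0 : String) : pvAState :=
  let word := PySem.Str.lower word0
  match (PySem.Dict.mk sentimentos).get? word with
  | none => st
  | some l =>
    -- sentimentos[word][1]: IndexError when l has < 2 entries — those inputs are outside Pre_;
    -- the '.getD ""' default is never reached under Pre_.
    let pol := (PySem.List.pyGet? l 1).getD ""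
    match st with
    | (pos, neg, neu, cn, cp, cz) =>
      if pol == "-1" then (pos, neg + 1, neu, cn.modify word 0 (· + 1), cp, cz)
      else if pol == "0" then (pos, neg, neu + 1, cn, cp, cz.modify word 0 (· + 1))
      else (pos + 1, neg, neu, cn, cp.modify word 0 (· + 1), cz)

def contagem_por_polaridade (sentimentos : List (String × List String)) (linha : String) : Int × Int × Int × (List (String × Int)) × (List (String × Int)) × (List (String × Int)) :=
  match (PySem.Str.split₀ linha).foldl (pvAStep sentimentos) (0, 0, 0, PySem.Dict.empty, PySem.Dict.empty, PySem.Dict.empty) with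
  | (pos, neg, neu, cn, cp, cz) => (neg, neu, pos, cn.items, cp.items, cz.items)

-- ===== PORT B =====
-- matched = [(w, sentimentos[w][1]) for w in (word.lower() for word in linha.split()) if w in sentimentos]
def pvMatched (sentimentos : List (String × List String)) (linha : String) : List (String × String) :=
  ((PySem.Str.split₀ linha).map PySem.Str.lower).filterMap (fun w =>
    ((PySem.Dict.mk sentimentos).get? w).map (fun l => (w, (PySem.List.pyGet? l 1).getD "")))

def pvIsNeg (p : String) : Bool := p == "-1"
def pvIsNeu (p : String) : Bool := p == "0"
def pvIsPos (p : String) : Bool := !(p == "-1") && !(p == "0")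

def contagem_por_polaridade_alt (sentimentos : List (String × List String)) (linha : String) : Int × Int × Int × (List (String × Int)) × (List (String × Int)) × (List (String × Int)) :=
  let matched := pvMatched sentimentos linha
  let negatividade : Int := ((matched.filter (fun wp => pvIsNeg wp.2)).length : Int)
  let neutralidade : Int := ((matched.filter (fun wp => pvIsNeu wp.2)).length : Int)
  let positividade : Int := ((matched.filter (fun wp => pvIsPos wp.2)).length : Int)
  let palavras_negativas := PySem.Dict.counter ((matched.filter (fun wp => pvIsNeg wp.2)).map (·.1))
  let palavras_neutras := PySem.Dict.counter ((matched.filter (fun wp => pvIsNeu wp.2)).map (·.1))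
  let palavras_positivas := PySem.Dict.counter ((matched.filter (fun wp => pvIsPos wp.2)).map (·.1))
  (negatividade, neutralidade, positividade, palavras_negativas.items, palavras_positivas.items, palavras_neutras.items)

-- ===== PRECONDITION & SPEC =====
-- Pre_ excludes exactly the inputs where A raises IndexError: a word of the line whose lowered
-- form is a key of sentimentos mapped to a list with fewer than 2 entries (B raises there too).
def Pre_contagem_por_polaridade (sentimentos : List (String × List String)) (linha : String) : Prop :=
  ∀ w ∈ PySem.Str.split₀ linha,
    ∀ l, (PySem.Dict.mk sentimentos).get? (PySem.Str.lower w) = some l → 2 ≤ l.length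
instance (sentimentos : List (String × List String)) (linha : String) : Decidable (Pre_contagem_por_polaridade sentimentos linha) := by unfold Pre_contagem_por_polaridade; infer_instance

def pvWitness_contagem_por_polaridade : (List (String × List String)) × String :=
  ([("bom", ["bom", "1"]), ("mau", ["mau", "-1"])], "Bom dia mau bom")

def Spec_contagem_por_polaridade (sentimentos : List (String × List String)) (linha : String) (out : Int × Int × Int × (List (String × Int)) × (List (String × Int)) × (List (String × Int))) : Prop := out = contagem_por_polaridade_alt sentimentos linha
instance (sentimentos : List (String × List String)) (linha : String) (out : Int × Int × Int × (List (String × Int)) × (List (String × Int)) × (List (String × Int))) : Decidable (Spec_contagem_por_polaridade sentimentos linha out) := by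
  unfold Spec_contagem_por_polaridade
  have hL : DecidableEq (List (String × Int)) := inferInstance
  have hI : DecidableEq Int := inferInstance
  exact @instDecidableEqProd _ _ hI (@instDecidableEqProd _ _ hI (@instDecidableEqProd _ _ hI
    (@instDecidableEqProd _ _ hL (@instDecidableEqProd _ _ hL hL)))) _ _

-- ===== CLAIM (what is proved, stated in full; the proofs are below) =====
def Claim_equal_contagem_por_polaridade : Prop := ∀ (sentimentos : List (String × List String)) (linha : String), Dom_contagem_por_polaridade sentimentos linha → Pre_contagem_por_polaridade sentimentos linha → Spec_contagem_por_polaridade sentimentos linha (contagem_por_polaridade sentimentos linha)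

-- ===== LEMMAS AND PROOFS =====

-- A's step acts on a matched pair (w, pol)
def pvAStep2 (st : pvAState) (wp : String × String) : pvAState :=
  match st with
  | (pos, neg, neu, cn, cp, cz) =>
    if pvIsNeg wp.2 then (pos, neg + 1, neu, cn.modify wp.1 0 (· + 1), cp, cz)
    else if pvIsNeu wp.2 then (pos, neg, neu + 1, cn, cp, cz.modify wp.1 0 (· + 1))
    else (pos + 1, neg, neu, cn, cp.modify wp.1 0 (· + 1), cz)

theorem pvFold_eq_matched (sentimentos : List (String × List String)) (ws : List String) (st : pvAState) :
    ws.foldl (pvAStep sentimentos) st =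
    ((ws.map PySem.Str.lower).filterMap (fun w =>
      ((PySem.Dict.mk sentimentos).get? w).map (fun l => (w, (PySem.List.pyGet? l 1).getD "")))).foldl pvAStep2 st := by
  induction ws generalizing st with
  | nil => rfl
  | cons w ws ih =>
    simp only [List.map_cons, List.filterMap_cons, List.foldl_cons]
    cases h : (PySem.Dict.mk sentimentos).get? (PySem.Str.lower w) with
    | none =>
      simp only [Option.map_none]
      rw [← ih]; congr 1; simp [pvAStep, h]
    | some l =>
      simp only [Option.map_some, List.foldl_cons]
      rw [← ih]
      congr 1
      rcases st with ⟨pos, neg, neu, cn, cp, cz⟩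
      simp [pvAStep, pvAStep2, h, pvIsNeg, pvIsNeu]

def pvModFold (c : PySem.Dict String Int) (ws : List String) : PySem.Dict String Int :=
  ws.foldl (fun d x => d.modify x 0 (· + 1)) c

theorem pvFold2_char (m : List (String × String)) (pos neg neu : Int)
    (cn cp cz : PySem.Dict String Int) :
    m.foldl pvAStep2 (pos, neg, neu, cn, cp, cz) =
    (pos + ((m.filter (fun wp => pvIsPos wp.2)).length : Int),
     neg + ((m.filter (fun wp => pvIsNeg wp.2)).length : Int),
     neu + ((m.filter (fun wp => pvIsNeu wp.2)).length : Int),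
     pvModFold cn ((m.filter (fun wp => pvIsNeg wp.2)).map (·.1)),
     pvModFold cp ((m.filter (fun wp => pvIsPos wp.2)).map (·.1)),
     pvModFold cz ((m.filter (fun wp => pvIsNeu wp.2)).map (·.1))) := by
  induction m generalizing pos neg neu cn cp cz with
  | nil => simp [pvModFold]
  | cons wp m ih =>
    simp only [List.foldl_cons, pvAStep2]
    by_cases h1 : pvIsNeg wp.2
    · have h2 : ¬ pvIsNeu wp.2 := by simp [pvIsNeg] at h1; simp [pvIsNeu, h1]
      have h3 : ¬ pvIsPos wp.2 := by simp [pvIsPos, pvIsNeg] at *; simp [h1]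
      simp [h1, h2, h3, ih, pvModFold]
      ring_nf
    · by_cases h2 : pvIsNeu wp.2
      · have h3 : ¬ pvIsPos wp.2 := by simp [pvIsPos, pvIsNeu] at *; simp [h2]
        simp [h1, h2, h3, ih, pvModFold]
        ring_nf
      · have h3 : pvIsPos wp.2 := by simp [pvIsPos, pvIsNeg, pvIsNeu] at *; exact ⟨h1, h2⟩
        simp [h1, h2, h3, ih, pvModFold]
        ring_nf

-- ===== VERDICT (by name: the statement is the Claim_ definition above) =====
theorem contagem_por_polaridade_spec : Claim_equal_contagem_por_polaridade := by
  intro sentimentos linha _ _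
  unfold Spec_contagem_por_polaridade contagem_por_polaridade contagem_por_polaridade_alt
  rw [pvFold_eq_matched]
  show (match (pvMatched sentimentos linha).foldl pvAStep2
      (0, 0, 0, PySem.Dict.empty, PySem.Dict.empty, PySem.Dict.empty) with
    | (pos, neg, neu, cn, cp, cz) => (neg, neu, pos, cn.items, cp.items, cz.items)) = _
  rw [pvFold2_char]
  simp [PySem.Dict.counter_eq_foldl, pvModFold]
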